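-- pv_equiv track=rewrite | github.com/adimascf/Bioinfomatics-Algorithms | Finding_mutations/multiple_pattern_matching.py | create_check_point
-- ===== SOURCE A (Python) =====
-- def create_check_point(bwt_string, c):
--
--     unique_char = list(set(bwt_string))
--     check_point = {}
--     for i in range(0, len(bwt_string), c):
--         check_point[i] = {}
--         for char in unique_char:
--             check_point[i][char] = bwt_string[:i].count(char)
--     return check_point
-- ===== SOURCE B (Python) =====
-- def create_check_point(bwt_string, c):
--     counts = {ch: 0 for ch in set(bwt_string)}
--     check_point = {}
--     prev = 0
--     for i in range(0, len(bwt_string), c):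
--         for ch in bwt_string[prev:i]:
--             counts[ch] += 1
--         prev = i
--         check_point[i] = dict(counts)
--     return check_point
-- ===== Notes on version B (the rewrite author's own statement) =====
-- stated objective: alternative
-- what changed: Instead of recounting every unique character over the whole prefix bwt_string[:i] at each checkpoint, B makes a single left-to-right pass keeping running character counts, advancing them over the slice between consecutive checkpoints and snapshotting the dict at each checkpoint; this trades A's repeated prefix scans for one incremental scan.
import Mathlib
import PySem

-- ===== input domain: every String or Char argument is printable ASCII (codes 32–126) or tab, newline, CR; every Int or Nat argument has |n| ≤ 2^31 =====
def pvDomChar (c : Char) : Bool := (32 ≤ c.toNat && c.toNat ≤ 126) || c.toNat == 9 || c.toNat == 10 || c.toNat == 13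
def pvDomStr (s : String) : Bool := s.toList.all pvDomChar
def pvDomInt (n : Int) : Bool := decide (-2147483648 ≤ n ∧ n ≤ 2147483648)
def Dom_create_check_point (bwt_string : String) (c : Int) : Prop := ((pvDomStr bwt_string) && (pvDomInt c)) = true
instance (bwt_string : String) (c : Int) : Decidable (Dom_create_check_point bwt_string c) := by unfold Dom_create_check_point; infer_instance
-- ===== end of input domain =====

-- B replaces A's per-checkpoint recount of the whole prefix with one single left-to-right
-- pass maintaining running character counts (alternative algorithm; same return value).


-- ===== PORT A =====
-- Literal port of A: for each i in range(0, len, c), for each unique char,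
-- check_point[i][char] = bwt_string[:i].count(char).  Strings are handled as List Char;
-- str.count of a single-character pattern equals the character count, so List.count is exact here.
def create_check_point (bwt_string : String) (c : Int) : List (Int × List (String × Int)) :=
  let cs : List Char := bwt_string.toList
  let unique_char : List Char := PySem.Set.ofList cs        -- list(set(bwt_string))
  let check_point : PySem.Dict Int (PySem.Dict String Int) :=
    (PySem.List.pyRange 0 (cs.length : Int) c).foldl
      (fun cp i =>
        cp.insert i
          (unique_char.foldl
            (fun d ch =>
              d.insert (String.ofList [ch]) (((PySem.List.slice cs none (some i)).count ch : Int)))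
            (PySem.Dict.mk [])))
      (PySem.Dict.mk [])
  check_point.items.map (fun p => (p.1, p.2.items))

-- ===== PORT B =====
-- Literal port of B (Source B): running counts over set(bwt_string), advanced over the slice
-- bwt_string[prev:i] between checkpoints; counts[ch] += 1 (key always present) is
-- insert ch (getD ch 0 + 1), exact where the Python returns.
def create_check_point_alt (bwt_string : String) (c : Int) : List (Int × List (String × Int)) :=
  let cs : List Char := bwt_string.toList
  let counts0 : PySem.Dict String Int :=
    (PySem.Set.ofList cs).foldl (fun d ch => d.insert (String.ofList [ch]) 0) (PySem.Dict.mk [])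
  let st :=
    (PySem.List.pyRange 0 (cs.length : Int) c).foldl
      (fun (st : PySem.Dict String Int × Int × PySem.Dict Int (PySem.Dict String Int)) i =>
        let counts :=
          (PySem.List.slice cs (some st.2.1) (some i)).foldl
            (fun d ch => d.insert (String.ofList [ch]) (d.getD (String.ofList [ch]) 0 + 1)) st.1
        (counts, i, st.2.2.insert i counts))
      (counts0, 0, PySem.Dict.mk [])
  st.2.2.items.map (fun p => (p.1, p.2.items))

-- ===== PRECONDITION & SPEC =====
-- Pre_ excludes only c = 0, on which Python's range(0, len, 0) raises ValueError (A returns on all other inputs).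
def Pre_create_check_point (bwt_string : String) (c : Int) : Prop := c ≠ 0
instance (bwt_string : String) (c : Int) : Decidable (Pre_create_check_point bwt_string c) := by
  unfold Pre_create_check_point; infer_instance

def pvWitness_create_check_point : String × Int := ("banana", 2)

def Spec_create_check_point (bwt_string : String) (c : Int) (out : List (Int × List (String × Int))) : Prop := out = create_check_point_alt bwt_string c
instance (bwt_string : String) (c : Int) (out : List (Int × List (String × Int))) : Decidable (Spec_create_check_point bwt_string c out) := by unfold Spec_create_check_point; infer_instance

-- ===== CLAIM (what is proved, stated in full; the proofs are below) =====
def Claim_equal_create_check_point : Prop := ∀ (bwt_string : String) (c : Int), Dom_create_check_point bwt_string c → Pre_create_check_point bwt_string c → Spec_create_check_point bwt_string c (create_check_point bwt_string c)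

-- ===== LEMMAS AND PROOFS =====

-- the canonical "row" of counts: one (singleton-string key, value) pair per unique char
def ccpRow (uc : List Char) (f : Char → Int) : List (String × Int) :=
  uc.map (fun ch => (String.ofList [ch], f ch))

theorem ccp_s1_inj {a b : Char} (h : String.ofList [a] = String.ofList [b]) : a = b := by
  simpa using congrArg String.toList h

theorem ccp_s1_beq (a b : Char) : (String.ofList [a] == String.ofList [b]) = (a == b) := by
  by_cases h : a = b
  · simp [h]
  · simp [h]
    intro h'
    exact h (ccp_s1_inj h')

-- folding fresh singleton-string keyed inserts builds the row by appending
theorem ccp_mk_fold (uc : List Char) (f : Char → Int) :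
    ∀ (pre : List (String × Int)), uc.Nodup →
    (∀ ch ∈ uc, (PySem.Dict.mk pre).contains (String.ofList [ch]) = false) →
    uc.foldl (fun d ch => d.insert (String.ofList [ch]) (f ch)) (PySem.Dict.mk pre)
      = PySem.Dict.mk (pre ++ ccpRow uc f) := by
  induction uc with
  | nil => intro pre _ _; simp [ccpRow]
  | cons x t ih =>
    intro pre hnd hfresh
    have hx : (PySem.Dict.mk pre).contains (String.ofList [x]) = false := hfresh x (by simp)
    have : (PySem.Dict.mk pre).insert (String.ofList [x]) (f x)
        = PySem.Dict.mk (pre ++ [(String.ofList [x], f x)]) := by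
      simp [PySem.Dict.insert, hx]
    rw [List.foldl_cons, this, ih (pre ++ [(String.ofList [x], f x)]) (List.Nodup.of_cons hnd)]
    · simp [ccpRow]
    · intro ch hch
      have h1 : (PySem.Dict.mk pre).contains (String.ofList [ch]) = false := hfresh ch (by simp [hch])
      have h2 : ch ≠ x := by
        intro h; exact (List.nodup_cons.mp hnd).1 (h ▸ hch)
      simp only [PySem.Dict.contains, List.any_append] at h1 ⊢
      simp [h1, ccp_s1_beq]
      exact fun h => h2 h.symm

-- inserting an existing key updates the row in place
theorem ccp_insert_row (uc : List Char) (f : Char → Int) (x : Char) (v : Int)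
    (hx : x ∈ uc) :
    (PySem.Dict.mk (ccpRow uc f)).insert (String.ofList [x]) v
      = PySem.Dict.mk (ccpRow uc (fun ch => if ch = x then v else f ch)) := by
  have hc : (PySem.Dict.mk (ccpRow uc f)).contains (String.ofList [x]) = true := by
    simp only [PySem.Dict.contains, ccpRow, List.any_map, List.any_eq_true]
    exact ⟨x, hx, by simp⟩
  simp only [PySem.Dict.insert, hc, if_pos]
  congr 1
  simp only [ccpRow, List.map_map]
  apply List.map_congr_left
  intro ch _
  by_cases h : ch = x <;> simp [h, Function.comp, ccp_s1_beq]

theorem ccp_getD_row (uc : List Char) (f : Char → Int) (x : Char)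
    (hnd : uc.Nodup) (hx : x ∈ uc) :
    (PySem.Dict.mk (ccpRow uc f)).getD (String.ofList [x]) 0 = f x := by
  induction uc with
  | nil => simp at hx
  | cons y t ih =>
    by_cases h : y = x
    · subst h
      simp [PySem.Dict.getD, PySem.Dict.get?, ccpRow]
    · have hxt : x ∈ t := by
        rcases List.mem_cons.mp hx with h' | h'
        · exact absurd h'.symm h
        · exact h'
      have := ih (List.Nodup.of_cons hnd) hxt
      simp only [PySem.Dict.getD, PySem.Dict.get?, ccpRow, List.map_cons, List.find?_cons] at this ⊢
      have hne : (String.ofList [y] == String.ofList [x]) = false := by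
        simp [ccp_s1_beq, h]
      rw [hne]
      exact this

-- advancing the running counts over a chunk adds the chunk's counts
theorem ccp_chunk (uc : List Char) (hnd : uc.Nodup) :
    ∀ (chunk : List Char) (f : Char → Int), (∀ ch ∈ chunk, ch ∈ uc) →
    chunk.foldl (fun d ch => d.insert (String.ofList [ch]) (d.getD (String.ofList [ch]) 0 + 1))
        (PySem.Dict.mk (ccpRow uc f))
      = PySem.Dict.mk (ccpRow uc (fun ch => f ch + chunk.count ch)) := by
  intro chunk
  induction chunk with
  | nil => intro f _; simp [ccpRow]
  | cons x t ih =>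
    intro f hmem
    have hx : x ∈ uc := hmem x (by simp)
    rw [List.foldl_cons, ccp_getD_row uc f x hnd hx, ccp_insert_row uc f x _ hx,
        ih _ (fun ch h => hmem ch (by simp [h]))]
    congr 1
    simp only [ccpRow]
    apply List.map_congr_left
    intro ch _
    beta_reduce
    by_cases h : ch = x
    · simp [h]
      ring
    · simp [h, Ne.symm h]

-- folding inserts with strictly increasing fresh Int keys appends, one item per key
theorem ccp_outer_fresh (g : Int → PySem.Dict String Int) :
    ∀ (is : List Int) (acc : List (Int × PySem.Dict String Int)),
    is.Pairwise (· < ·) →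
    (∀ i ∈ is, (acc.any (fun p => p.1 == i)) = false) →
    (is.foldl (fun cp i => cp.insert i (g i)) (PySem.Dict.mk acc)).items
      = acc ++ is.map (fun i => (i, g i)) := by
  intro is
  induction is with
  | nil => intro acc _ _; simp
  | cons x t ih =>
    intro acc hpw hfresh
    have hx : (PySem.Dict.mk acc).contains x = false := by
      simpa [PySem.Dict.contains] using hfresh x (by simp)
    have hstep : (PySem.Dict.mk acc).insert x (g x) = PySem.Dict.mk (acc ++ [(x, g x)]) := by
      simp [PySem.Dict.insert, hx]
    rw [List.foldl_cons, hstep, ih (acc ++ [(x, g x)]) (List.Pairwise.of_cons hpw)]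
    · simp
    · intro i hi
      have hlt : x < i := (List.pairwise_cons.mp hpw).1 i hi
      have h1 := hfresh i (by simp [hi])
      simp only [List.any_append] at *
      simp [h1]
      omega

-- B's main loop invariant: starting from the counts of take prev, folding the index list
-- appends one checkpoint row per index, each holding the counts of the corresponding prefix
theorem ccp_loop (cs : List Char) :
    ∀ (is : List Int) (prev : Int) (acc : List (Int × PySem.Dict String Int)),
    is.Pairwise (· < ·) →
    (∀ i ∈ is, prev ≤ i) →
    0 ≤ prev →
    (∀ i ∈ is, (acc.any (fun p => p.1 == i)) = false) →
    (is.foldl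
      (fun (st : PySem.Dict String Int × Int × PySem.Dict Int (PySem.Dict String Int)) i =>
        let counts :=
          (PySem.List.slice cs (some st.2.1) (some i)).foldl
            (fun d ch => d.insert (String.ofList [ch]) (d.getD (String.ofList [ch]) 0 + 1)) st.1
        (counts, i, st.2.2.insert i counts))
      (PySem.Dict.mk (ccpRow (PySem.Set.ofList cs)
          (fun ch => ((cs.take prev.toNat).count ch : Int))), prev, PySem.Dict.mk acc)).2.2.items
      = acc ++ is.map (fun i => (i, PySem.Dict.mk (ccpRow (PySem.Set.ofList cs)
          (fun ch => ((cs.take i.toNat).count ch : Int))))) := by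
  intro is
  induction is with
  | nil => intro prev acc _ _ _ _; simp
  | cons x t ih =>
    intro prev acc hpw hlb hprev hfresh
    have hpx : prev ≤ x := hlb x (by simp)
    have hx0 : 0 ≤ x := le_trans hprev hpx
    have hslice : PySem.List.slice cs (some prev) (some x)
        = (cs.drop prev.toNat).take (x.toNat - prev.toNat) :=
      PySem.List.slice_toNat cs hprev hx0
    have hchunk :
        (PySem.List.slice cs (some prev) (some x)).foldl
          (fun d ch => d.insert (String.ofList [ch]) (d.getD (String.ofList [ch]) 0 + 1))
          (PySem.Dict.mk (ccpRow (PySem.Set.ofList cs)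
            (fun ch => ((cs.take prev.toNat).count ch : Int))))
        = PySem.Dict.mk (ccpRow (PySem.Set.ofList cs)
            (fun ch => ((cs.take x.toNat).count ch : Int))) := by
      rw [ccp_chunk (PySem.Set.ofList cs) (PySem.Set.nodup_ofList cs) _ _ ?hmem]
      · congr 1
        apply List.map_congr_left
        intro ch _
        beta_reduce
        have htake : cs.take x.toNat
            = cs.take prev.toNat ++ (cs.drop prev.toNat).take (x.toNat - prev.toNat) := by
          rw [← List.take_add]
          congr 1
          omega
        rw [hslice, htake, List.count_append]
        push_cast
        ring
      case hmem =>
        intro ch hch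
        rw [PySem.Set.mem_ofList]
        exact PySem.List.mem_of_mem_slice cs _ _ hch
    have hstep : (PySem.Dict.mk acc).insert x
        (PySem.Dict.mk (ccpRow (PySem.Set.ofList cs)
          (fun ch => ((cs.take x.toNat).count ch : Int))))
        = PySem.Dict.mk (acc ++ [(x, PySem.Dict.mk (ccpRow (PySem.Set.ofList cs)
            (fun ch => ((cs.take x.toNat).count ch : Int))))]) := by
      have hx : (PySem.Dict.mk acc).contains x = false := by
        simpa [PySem.Dict.contains] using hfresh x (by simp)
      simp [PySem.Dict.insert, hx]
    rw [List.foldl_cons]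
    simp only [hchunk]
    rw [hstep, ih x (acc ++ [(x, _)]) (List.Pairwise.of_cons hpw)
        (fun i hi => le_of_lt ((List.pairwise_cons.mp hpw).1 i hi)) hx0 ?hfr]
    · simp
    case hfr =>
      intro i hi
      have hlt : x < i := (List.pairwise_cons.mp hpw).1 i hi
      have h1 := hfresh i (by simp [hi])
      simp only [List.any_append] at *
      simp [h1]
      omega

theorem ccp_pyRange_pairwise (a b s : Int) (hs : 0 < s) :
    (PySem.List.pyRange a b s).Pairwise (· < ·) := by
  rw [PySem.List.pyRange_of_pos a b hs, List.pairwise_map]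
  refine List.pairwise_lt_range.imp ?_
  intro k1 k2 h
  have hk : (k1 : Int) < (k2 : Int) := by exact_mod_cast h
  nlinarith

theorem ccp_pyRange_neg (n s : Int) (hn : 0 ≤ n) (hs : s < 0) :
    PySem.List.pyRange 0 n s = [] := by
  have h1 : ¬ s = 0 := by omega
  have h2 : ¬ 0 < s := by omega
  have h3 : ¬ n < 0 := by omega
  simp [PySem.List.pyRange, h1, h2, h3]

-- ===== VERDICT (by name: the statement is the Claim_ definition above) =====
theorem create_check_point_spec : Claim_equal_create_check_point := by
  intro bwt_string c _ hc
  simp only [Spec_create_check_point, create_check_point, create_check_point_alt]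
  set cs := bwt_string.toList with hcs
  rcases lt_or_gt_of_ne hc with hneg | hpos
  · -- negative step: range(0, n, c) is empty in both programs
    rw [ccp_pyRange_neg (cs.length : Int) c (by positivity) hneg]
    simp
  · -- positive step
    have hpw := ccp_pyRange_pairwise 0 (cs.length : Int) c hpos
    have hnonneg : ∀ i ∈ PySem.List.pyRange 0 (cs.length : Int) c, (0:Int) ≤ i := by
      intro i hi
      exact ((PySem.List.mem_pyRange_iff_of_pos hpos i).mp hi).1
    -- A's side
    have hA : ∀ i ∈ PySem.List.pyRange 0 (cs.length : Int) c,
        (PySem.Set.ofList cs).foldl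
          (fun d ch => d.insert (String.ofList [ch]) (((PySem.List.slice cs none (some i)).count ch : Int)))
          (PySem.Dict.mk [])
        = PySem.Dict.mk (ccpRow (PySem.Set.ofList cs)
            (fun ch => ((cs.take i.toNat).count ch : Int))) := by
      intro i hi
      rw [PySem.List.slice_to cs (hnonneg i hi),
          ccp_mk_fold (PySem.Set.ofList cs) _ [] (PySem.Set.nodup_ofList cs) (by simp [PySem.Dict.contains])]
      simp
    rw [ccp_outer_fresh _ _ [] hpw (by simp)]
    have hB0 : (PySem.Set.ofList cs).foldl
        (fun d ch => d.insert (String.ofList [ch]) 0) (PySem.Dict.mk [])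
        = PySem.Dict.mk (ccpRow (PySem.Set.ofList cs)
            (fun ch => ((cs.take (0:Int).toNat).count ch : Int))) := by
      rw [ccp_mk_fold (PySem.Set.ofList cs) _ [] (PySem.Set.nodup_ofList cs) (by simp [PySem.Dict.contains])]
      simp
    rw [hB0, ccp_loop cs _ 0 [] hpw hnonneg le_rfl (by simp)]
    simp only [List.nil_append, List.map_map]
    apply List.map_congr_left
    intro i hi
    simp [hA i hi]
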